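-- pv_equiv track=rewrite | github.com/farzanekram07/Data-Structures-and-Algorithms | 1 Logic Building/pair_cube_count.py | cube_pair_count
-- ===== SOURCE A (Python) =====
-- def cube_pair_count(n):
--     count = 0
--     new_arr = []
--     for i in range(n):
--         for j in range(n):
--             if i ** 3 + j ** 3 == n:
--                 new_arr.append([i,j])
--                 count += 1
--     return new_arr, count
-- ===== SOURCE B (Python) =====
-- def cube_pair_count(n):
--     # For each i with i**3 <= n, find the unique candidate j as the integer
--     # cube root of n - i**3 and keep the pair if it really is a cube.
--     new_arr = []
--     i = 0
--     while i < n and i * i * i <= n: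
--         r = n - i * i * i
--         j = 0
--         while j * j * j < r:
--             j += 1
--         if j * j * j == r and j < n:
--             new_arr.append([i, j])
--         i += 1
--     return new_arr, len(new_arr)
-- ===== Notes on version B (the rewrite author's own statement) =====
-- stated objective: faster
-- what changed: Replaced the O(n^2) double scan over all (i,j) pairs by a single loop over i up to cbrt(n) that computes the unique candidate j as the integer cube root of n - i^3 and checks it is exact.
import Mathlib
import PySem

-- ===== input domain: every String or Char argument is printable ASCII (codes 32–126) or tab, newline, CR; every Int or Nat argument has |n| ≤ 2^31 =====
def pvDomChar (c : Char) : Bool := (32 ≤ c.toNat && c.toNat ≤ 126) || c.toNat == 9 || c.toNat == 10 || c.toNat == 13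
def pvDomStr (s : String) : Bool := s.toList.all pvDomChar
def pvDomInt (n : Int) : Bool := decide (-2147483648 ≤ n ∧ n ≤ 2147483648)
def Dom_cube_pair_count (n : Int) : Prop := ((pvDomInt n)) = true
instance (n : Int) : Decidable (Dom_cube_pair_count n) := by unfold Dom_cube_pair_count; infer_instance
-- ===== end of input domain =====

-- B replaces A's O(n^2) double scan by a loop over i with i^3 ≤ n that computes the unique
-- candidate j as the integer cube root of n - i^3 (objective: faster).

-- ===== PORT A =====
def cube_pair_count (n : Int) : List (List Int) × Int :=
  let st : List (List Int) × Int :=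
    (PySem.List.pyRange 0 n 1).foldl (fun st i =>
      (PySem.List.pyRange 0 n 1).foldl (fun st j =>
        if i ^ 3 + j ^ 3 = n then (st.1 ++ [[i, j]], st.2 + 1) else st) st)
      ([], 0)
  (st.1, st.2)

-- ===== PORT B =====
-- inner `while j*j*j < r: j += 1` of Source B
def pvIcbrt (r j : Int) : Int :=
  if h : j * j * j < r then pvIcbrt r (j + 1) else j
termination_by (max r 1 - j).toNat
decreasing_by
  have hj : j < max r 1 := by
    by_contra hc
    push Not at hc
    have h1 : (1 : Int) ≤ j := le_trans (le_max_right r 1) hc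
    have h2 : r ≤ j := le_trans (le_max_left r 1) hc
    nlinarith
  omega

-- outer `while i < n and i*i*i <= n` of Source B
def pvLoopI (n i : Int) (arr : List (List Int)) : List (List Int) :=
  if _h : i < n ∧ i * i * i ≤ n then
    pvLoopI n (i + 1)
      (if pvIcbrt (n - i * i * i) 0 * pvIcbrt (n - i * i * i) 0 * pvIcbrt (n - i * i * i) 0
            = n - i * i * i ∧ pvIcbrt (n - i * i * i) 0 < n
       then arr ++ [[i, pvIcbrt (n - i * i * i) 0]] else arr)
  else arr
termination_by (n - i).toNat
decreasing_by omega

def cube_pair_count_alt (n : Int) : List (List Int) × Int :=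
  let arr := pvLoopI n 0 []
  (arr, (arr.length : Int))

-- ===== PRECONDITION & SPEC =====
def Spec_cube_pair_count (n : Int) (out : List (List Int) × Int) : Prop := out = cube_pair_count_alt n
instance (n : Int) (out : List (List Int) × Int) : Decidable (Spec_cube_pair_count n out) := by unfold Spec_cube_pair_count; infer_instance

-- ===== CLAIM (what is proved, stated in full; the proofs are below) =====
def Claim_equal_cube_pair_count : Prop := ∀ (n : Int), Dom_cube_pair_count n → Spec_cube_pair_count n (cube_pair_count n)

-- ===== LEMMAS AND PROOFS =====

theorem cube_le_cube {a b : Int} (ha : 0 ≤ a) (h : a ≤ b) : a * a * a ≤ b * b * b := by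
  have hb : 0 ≤ b := le_trans ha h
  have h2 : a * a ≤ b * b := mul_le_mul h h ha hb
  exact mul_le_mul h2 h ha (mul_nonneg hb hb)

theorem cube_lt_cube {a b : Int} (ha : 0 ≤ a) (h : a < b) : a * a * a < b * b * b := by
  have hb : 0 < b := lt_of_le_of_lt ha h
  have h2 : a * a ≤ b * b := mul_le_mul (le_of_lt h) (le_of_lt h) ha (le_of_lt hb)
  calc a * a * a ≤ b * b * a := mul_le_mul_of_nonneg_right h2 ha
    _ < b * b * b := mul_lt_mul_of_pos_left h (mul_pos hb hb)

theorem pvIcbrt_spec (r j : Int) (hj : 0 ≤ j) (hlt : ∀ k, 0 ≤ k → k < j → k * k * k < r) :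
    0 ≤ pvIcbrt r j ∧ r ≤ pvIcbrt r j * pvIcbrt r j * pvIcbrt r j ∧
      ∀ k, 0 ≤ k → k < pvIcbrt r j → k * k * k < r := by
  by_cases h : j * j * j < r
  · rw [pvIcbrt, dif_pos h]
    refine pvIcbrt_spec r (j + 1) (by omega) ?_
    intro k hk hkj
    rcases lt_or_eq_of_le (by omega : k ≤ j) with hk' | hk'
    · exact hlt k hk hk'
    · subst hk'; exact h
  · rw [pvIcbrt, dif_neg h]
    exact ⟨hj, by omega, hlt⟩
termination_by (max r 1 - j).toNat
decreasing_by
  have hjm : j < max r 1 := by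
    by_contra hc
    push Not at hc
    have h1 : (1 : Int) ≤ j := le_trans (le_max_right r 1) hc
    have h2 : r ≤ j := le_trans (le_max_left r 1) hc
    nlinarith
  omega

theorem pvIcbrt_unique {r c x : Int} (hc0 : 0 ≤ c) (hcr : r ≤ c * c * c)
    (hmin : ∀ k, 0 ≤ k → k < c → k * k * k < r) (hx0 : 0 ≤ x) (hx : x * x * x = r) : x = c := by
  rcases lt_trichotomy x c with h | h | h
  · have := hmin x hx0 h; omega
  · exact h
  · have hlt : c * c * c < x * x * x := cube_lt_cube hc0 h
    omega

-- `out.append(x); count += 1` under an if, folded over a list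
theorem foldl_pair_append (l : List Int) (p : Int → Prop) [DecidablePred p]
    (f : Int → List Int) (a : List (List Int)) (c : Int) :
    l.foldl (fun st j => if p j then (st.1 ++ [f j], st.2 + 1) else st) (a, c)
      = (a ++ (l.filter (fun j => decide (p j))).map f,
         c + ((l.filter (fun j => decide (p j))).length : Int)) := by
  induction l generalizing a c with
  | nil => simp
  | cons x t ih =>
    by_cases hx : p x
    · simp only [List.foldl_cons, if_pos hx, ih, List.filter_cons, decide_eq_true hx]
      simp [List.append_assoc]
      omega
    · simp only [List.foldl_cons, if_neg hx, ih, List.filter_cons]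
      simp [hx]

theorem foldl_pair_flat (l : List Int) (g : Int → List (List Int)) (a : List (List Int)) (c : Int) :
    l.foldl (fun st i => (st.1 ++ g i, st.2 + ((g i).length : Int))) (a, c)
      = (a ++ l.flatMap g, c + ((l.flatMap g).length : Int)) := by
  induction l generalizing a c with
  | nil => simp
  | cons x t ih =>
    simp only [List.foldl_cons, ih, List.flatMap_cons, List.append_assoc, List.length_append]
    rw [Prod.mk.injEq]
    refine ⟨rfl, ?_⟩
    push_cast; ring

theorem filter_eq_unique (p : Int → Bool) (c : Int) (l : List Int) (hnd : l.Nodup)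
    (hu : ∀ x ∈ l, p x = true → x = c) :
    l.filter p = if c ∈ l ∧ p c = true then [c] else [] := by
  induction l with
  | nil => simp
  | cons a t ih =>
    rcases List.nodup_cons.mp hnd with ⟨ha, ht⟩
    by_cases hpa : p a = true
    · have hac : a = c := hu a (List.mem_cons_self) hpa
      subst hac
      have ht0 : t.filter p = [] := by
        rw [List.filter_eq_nil_iff]
        intro x hx hpx
        exact ha ((hu x (List.mem_cons_of_mem _ hx) hpx) ▸ hx)
      simp [hpa, ht0]
    · have hstep : (a :: t).filter p = t.filter p := by simp [hpa]
      rw [hstep, ih ht (fun x hx hpx => hu x (List.mem_cons_of_mem _ hx) hpx)]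
      by_cases hc : p c = true
      · have hca : ¬ c = a := fun h => hpa (h ▸ hc)
        simp [List.mem_cons, hc, hca]
      · simp [hc]

-- the per-i contribution of B's loop
def pvG (n i : Int) : List (List Int) :=
  if pvIcbrt (n - i * i * i) 0 * pvIcbrt (n - i * i * i) 0 * pvIcbrt (n - i * i * i) 0
        = n - i * i * i ∧ pvIcbrt (n - i * i * i) 0 < n
  then [[i, pvIcbrt (n - i * i * i) 0]] else []

theorem pvG_eq_nil {n i : Int} (h : n - i * i * i < 0) : pvG n i = [] := by
  unfold pvG
  rcases pvIcbrt_spec (n - i * i * i) 0 (le_refl 0) (by intro k hk hk0; omega) with ⟨hc0, _, _⟩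
  have : 0 ≤ pvIcbrt (n - i * i * i) 0 * pvIcbrt (n - i * i * i) 0 * pvIcbrt (n - i * i * i) 0 := by
    positivity
  rw [if_neg]
  rintro ⟨h1, _⟩
  omega

theorem pvLoopI_eq (n i : Int) (arr : List (List Int)) (hi : 0 ≤ i) :
    pvLoopI n i arr = arr ++ (PySem.List.pyRange i n 1).flatMap (pvG n) := by
  by_cases h : i < n ∧ i * i * i ≤ n
  · rw [pvLoopI, dif_pos h, pvLoopI_eq n (i + 1) _ (by omega), PySem.List.pyRange_one_cons h.1,
        List.flatMap_cons]
    show (if _ then arr ++ [[i, _]] else arr) ++ _ = _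
    rw [show (if pvIcbrt (n - i * i * i) 0 * pvIcbrt (n - i * i * i) 0 * pvIcbrt (n - i * i * i) 0
            = n - i * i * i ∧ pvIcbrt (n - i * i * i) 0 < n
       then arr ++ [[i, pvIcbrt (n - i * i * i) 0]] else arr) = arr ++ pvG n i from by
      unfold pvG; split <;> simp]
    simp [List.append_assoc]
  · rw [pvLoopI, dif_neg h]
    rcases not_and_or.mp h with h' | h'
    · rw [PySem.List.pyRange_one_eq_nil (by omega)]; simp
    · have hnil : (PySem.List.pyRange i n 1).flatMap (pvG n) = [] := by
        rw [List.flatMap_eq_nil_iff]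
        intro x hx
        rcases (PySem.List.mem_pyRange_one).mp hx with ⟨hix, _⟩
        have : i * i * i ≤ x * x * x := cube_le_cube hi hix
        exact pvG_eq_nil (by omega)
      rw [hnil]; simp
termination_by (n - i).toNat
decreasing_by omega

-- the per-i contribution of A's inner loop equals pvG
theorem inner_eq_pvG (n i : Int) :
    (((PySem.List.pyRange 0 n 1).filter (fun j => decide (i ^ 3 + j ^ 3 = n))).map
        (fun j => [i, j])) = pvG n i := by
  set r := n - i * i * i with hr
  set c := pvIcbrt r 0 with hc
  rcases pvIcbrt_spec r 0 (le_refl 0) (by intro k hk hk0; omega) with ⟨hc0, hcr, hmin⟩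
  have hp : ∀ x : Int, (i ^ 3 + x ^ 3 = n) ↔ (x * x * x = r) := by
    intro x
    have h1 : i ^ 3 = i * i * i := by ring
    have h2 : x ^ 3 = x * x * x := by ring
    rw [h1, h2, hr]; omega
  have hfil : (PySem.List.pyRange 0 n 1).filter (fun j => decide (i ^ 3 + j ^ 3 = n))
      = if c ∈ PySem.List.pyRange 0 n 1 ∧ decide (i ^ 3 + c ^ 3 = n) = true then [c] else [] := by
    apply filter_eq_unique _ c _ (PySem.List.nodup_pyRange_one 0 n)
    intro x hx hpx
    rcases (PySem.List.mem_pyRange_one).mp hx with ⟨hx0, _⟩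
    exact pvIcbrt_unique hc0 hcr hmin hx0 ((hp x).mp (of_decide_eq_true hpx))
  rw [hfil]
  unfold pvG
  rw [← hr, ← hc]
  by_cases hcond : c * c * c = r ∧ c < n
  · rw [if_pos hcond, if_pos, List.map_cons, List.map_nil]
    exact ⟨(PySem.List.mem_pyRange_one).mpr ⟨hc0, hcond.2⟩,
      decide_eq_true ((hp c).mpr hcond.1)⟩
  · rw [if_neg hcond, if_neg, List.map_nil]
    rintro ⟨hmem, hdec⟩
    exact hcond ⟨(hp c).mp (of_decide_eq_true hdec), ((PySem.List.mem_pyRange_one).mp hmem).2⟩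

-- ===== VERDICT (by name: the statement is the Claim_ definition above) =====
theorem cube_pair_count_spec : Claim_equal_cube_pair_count := by
  intro n _
  show cube_pair_count n = cube_pair_count_alt n
  unfold cube_pair_count cube_pair_count_alt
  rw [pvLoopI_eq n 0 [] (le_refl 0)]
  have houter : (PySem.List.pyRange 0 n 1).foldl (fun st i =>
      (PySem.List.pyRange 0 n 1).foldl (fun st j =>
        if i ^ 3 + j ^ 3 = n then (st.1 ++ [[i, j]], st.2 + 1) else st) st)
      (([], 0) : List (List Int) × Int)
      = (PySem.List.pyRange 0 n 1).foldl
          (fun st i => (st.1 ++ pvG n i, st.2 + ((pvG n i).length : Int))) (([], 0)) := by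
    apply PySem.List.foldl_congr_mem
    intro acc i _
    have hacc : acc = (acc.1, acc.2) := rfl
    have hg := inner_eq_pvG n i
    have hlen : ((PySem.List.pyRange 0 n 1).filter (fun j => decide (i ^ 3 + j ^ 3 = n))).length
        = (pvG n i).length := by rw [← hg, List.length_map]
    rw [hacc, foldl_pair_append _ (fun j => i ^ 3 + j ^ 3 = n) (fun j => [i, j]) acc.1 acc.2,
        hg, hlen]
  rw [houter, foldl_pair_flat]
  simp
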